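-- pv_equiv track=rewrite | github.com/TheAuditorTool/Auditor | scripts/rich_migration.py | _strip_leading_whitespace
-- ===== SOURCE A (Python) =====
-- def _strip_leading_whitespace(text: str) -> str:
--     """
--     Strip leading whitespace including escape sequences like \\n, \\t.
--
--     In a string literal, \\n is stored as two characters (backslash + n).
--     Regular lstrip() won't strip these, so we handle them explicitly.
--     """
--     i = 0
--     while i < len(text):
--         if text[i] in (" ", "\t", "\n", "\r"):
--             i += 1
--         elif text[i] == "\\" and i + 1 < len(text) and text[i + 1] in ("n", "t", "r"):
--             # Escape sequence like \n, \t, \r (two chars in source)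
--             i += 2
--         else:
--             break
--     return text[i:]
-- ===== SOURCE B (Python) =====
-- import re
--
-- _LEADING = re.compile(r'(?:[ \t\n\r]|\\[ntr])*')
--
-- def _strip_leading_whitespace(text: str) -> str:
--     """Strip leading whitespace and literal escape prefixes (\\n, \\t, \\r) with one anchored regex."""
--     return text[_LEADING.match(text).end():]
-- ===== Notes on version B (the rewrite author's own statement) =====
-- stated objective: idiomatic
-- what changed: Replaces the manual index-advancing while-loop with a single anchored regex that matches the whole leading prefix of whitespace characters or backslash-escape pairs and slices after it.
import Mathlib
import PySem

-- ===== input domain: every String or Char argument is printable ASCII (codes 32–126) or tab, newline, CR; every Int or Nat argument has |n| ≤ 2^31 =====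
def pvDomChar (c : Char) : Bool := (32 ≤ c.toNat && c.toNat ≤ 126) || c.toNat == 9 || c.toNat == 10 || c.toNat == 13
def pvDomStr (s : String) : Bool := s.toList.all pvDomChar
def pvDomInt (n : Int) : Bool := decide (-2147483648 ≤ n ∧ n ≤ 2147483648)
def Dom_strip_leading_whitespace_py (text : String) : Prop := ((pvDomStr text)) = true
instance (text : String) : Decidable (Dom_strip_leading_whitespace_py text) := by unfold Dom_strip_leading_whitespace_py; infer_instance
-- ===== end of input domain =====

-- B replaces A's index-advancing while-loop by one anchored-regex prefix match (idiomatic); return values proved equal on all of Dom.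

-- ===== PORT A =====
-- A's while-loop: advances an index i over the characters, then returns text[i:]
-- (text[i:] with 0 ≤ i is exactly List.drop i on the character list).
def stripLoopA (cs : List Char) (i : Nat) : Nat :=
  if h : i < cs.length then
    if cs[i] = ' ' ∨ cs[i] = '\t' ∨ cs[i] = '\n' ∨ cs[i] = '\r' then
      stripLoopA cs (i + 1)
    else if cs[i] = '\\' ∧ ∃ h2 : i + 1 < cs.length, (cs[i+1] = 'n' ∨ cs[i+1] = 't' ∨ cs[i+1] = 'r') then
      stripLoopA cs (i + 2)
    else i
  else i
termination_by cs.length - i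

def strip_leading_whitespace_py (text : String) : String :=
  String.mk (text.toList.drop (stripLoopA text.toList 0))

-- ===== PORT B =====
-- B's anchored regex (?:[ \t\n\r]|\\[ntr])* matches the longest leading prefix made of
-- single whitespace chars or two-char escape pairs; ported by hand as the structural
-- consumption the regex engine performs (exact: one alternation step per recursion,
-- a lone trailing backslash stays unmatched).
def regexPrefixB : List Char → List Char
  | [] => []
  | c :: rest =>
    if c = ' ' ∨ c = '\t' ∨ c = '\n' ∨ c = '\r' then regexPrefixB rest
    else if c = '\\' then
      match rest with
      | d :: rest' => if d = 'n' ∨ d = 't' ∨ d = 'r' then regexPrefixB rest' else c :: rest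
      | [] => c :: rest
    else c :: rest

def strip_leading_whitespace_py_alt (text : String) : String :=
  String.mk (regexPrefixB text.toList)

-- ===== PRECONDITION & SPEC =====
def Spec_strip_leading_whitespace_py (text : String) (out : String) : Prop := out = strip_leading_whitespace_py_alt text
instance (text : String) (out : String) : Decidable (Spec_strip_leading_whitespace_py text out) := by unfold Spec_strip_leading_whitespace_py; infer_instance

-- ===== CLAIM (what is proved, stated in full; the proofs are below) =====
def Claim_equal_strip_leading_whitespace_py : Prop := ∀ (text : String), Dom_strip_leading_whitespace_py text → Spec_strip_leading_whitespace_py text (strip_leading_whitespace_py text)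

-- ===== LEMMAS AND PROOFS =====

theorem regexPrefixB_nil : regexPrefixB [] = [] := rfl

theorem regexPrefixB_cons (c : Char) (rest : List Char) :
    regexPrefixB (c :: rest) =
      if c = ' ' ∨ c = '\t' ∨ c = '\n' ∨ c = '\r' then regexPrefixB rest
      else if c = '\\' then
        match rest with
        | d :: rest' => if d = 'n' ∨ d = 't' ∨ d = 'r' then regexPrefixB rest' else c :: rest
        | [] => c :: rest
      else c :: rest := by
  cases rest <;> rfl

theorem stripLoop_eq_regexPrefix (cs : List Char) (i : Nat) :
    cs.drop (stripLoopA cs i) = regexPrefixB (cs.drop i) := by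
  by_cases h : i < cs.length
  · have hdrop : cs.drop i = cs[i] :: cs.drop (i + 1) := List.drop_eq_getElem_cons h
    rw [stripLoopA, dif_pos h]
    by_cases hws : cs[i] = ' ' ∨ cs[i] = '\t' ∨ cs[i] = '\n' ∨ cs[i] = '\r'
    · rw [if_pos hws, hdrop, regexPrefixB_cons, if_pos hws]
      exact stripLoop_eq_regexPrefix cs (i + 1)
    · rw [if_neg hws]
      by_cases hesc : cs[i] = '\\' ∧ ∃ h2 : i + 1 < cs.length,
          (cs[i+1] = 'n' ∨ cs[i+1] = 't' ∨ cs[i+1] = 'r')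
      · obtain ⟨hbs, h2, hntr⟩ := hesc
        have hdrop2 : cs.drop (i + 1) = cs[i+1] :: cs.drop (i + 2) :=
          List.drop_eq_getElem_cons h2
        rw [if_pos ⟨hbs, h2, hntr⟩, hdrop, regexPrefixB_cons, if_neg hws, if_pos hbs, hdrop2]
        simp only [if_pos hntr]
        exact stripLoop_eq_regexPrefix cs (i + 2)
      · rw [if_neg hesc, hdrop, regexPrefixB_cons, if_neg hws]
        by_cases hbs : cs[i] = '\\'
        · rw [if_pos hbs]
          by_cases h2 : i + 1 < cs.length
          · have hdrop2 : cs.drop (i + 1) = cs[i+1] :: cs.drop (i + 2) :=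
              List.drop_eq_getElem_cons h2
            have hnot : ¬ (cs[i+1] = 'n' ∨ cs[i+1] = 't' ∨ cs[i+1] = 'r') := by
              intro hc; exact hesc ⟨hbs, h2, hc⟩
            simp only [hdrop2, if_neg hnot]
          · have h0 : cs.drop (i + 1) = [] := List.drop_eq_nil_of_le (by omega)
            simp only [h0]
        · rw [if_neg hbs, ← hdrop]
  · rw [stripLoopA, dif_neg h]
    have h1 : cs.drop i = [] := List.drop_eq_nil_of_le (by omega)
    rw [h1, regexPrefixB_nil]
termination_by cs.length - i

-- ===== VERDICT (by name: the statement is the Claim_ definition above) =====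
theorem strip_leading_whitespace_py_spec : Claim_equal_strip_leading_whitespace_py := by
  intro text _
  unfold Spec_strip_leading_whitespace_py strip_leading_whitespace_py strip_leading_whitespace_py_alt
  rw [stripLoop_eq_regexPrefix text.toList 0, List.drop_zero]
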